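-- pv_equiv track=rewrite | github.com/goodbai-nlp/Sem-Dialogue | DialogRE/bert/dataset_new.py | get_entity_mask
-- ===== SOURCE A (Python) =====
-- def get_entity_mask(src_ids, entity_ids):
--     mask = []
--     idx_src_s, idx_src_e = 0, 0
--     while idx_src_s < len(src_ids):
--         idx_ent = 0
--         if src_ids[idx_src_s] == entity_ids[idx_ent]:
--             idx_src_e = idx_src_s
--             idx_ent = 0
--             while (
--                 idx_src_e < len(src_ids)
--                 and idx_ent < len(entity_ids)
--                 and src_ids[idx_src_e] == entity_ids[idx_ent]
--             ):
--                 idx_src_e += 1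
--                 idx_ent += 1
--             if idx_ent == len(entity_ids):  # matched
--                 mask += [1] * len(entity_ids)
--                 idx_src_s = idx_src_e
--             else:
--                 mask.append(0)
--                 idx_src_s += 1
--         else:
--             mask.append(0)
--             idx_src_s += 1
--     assert len(mask) == len(src_ids)
--     return mask
-- ===== SOURCE B (Python) =====
-- def get_entity_mask(src_ids, entity_ids):
--     m = len(entity_ids)
--     # KMP failure function: fail[q] = longest proper border of entity_ids[:q+1]
--     fail = [0]
--     k = 0
--     for q in range(1, m):
--         while k and entity_ids[q] != entity_ids[k]:
--             k = fail[k - 1]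
--         if entity_ids[q] == entity_ids[k]:
--             k += 1
--         fail.append(k)
--     # single linear scan of the text; j = automaton state; reset after a match
--     # (greedy non-overlapping, same rule as the naive left-to-right scan)
--     starts = []
--     j = 0
--     i = 0
--     for x in src_ids:
--         while j and x != entity_ids[j]:
--             j = fail[j - 1]
--         if x == entity_ids[j]:
--             j += 1
--         if j == m:
--             starts.append(i + 1 - m)
--             j = 0
--         i += 1
--     # render the mask from the match starts
--     mask = []
--     pos = 0
--     for s in starts:
--         mask.extend([0] * (s - pos))
--         mask.extend([1] * m)
--         pos = s + m
--     mask.extend([0] * (len(src_ids) - pos))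
--     return mask
-- ===== Notes on version B (the rewrite author's own statement) =====
-- stated objective: alternative
-- what changed: Replaces A's naive restart-at-every-position scan with KMP: a precomputed failure function drives a single pass that never re-examines text characters, collecting greedy non-overlapping occurrence starts, and a final pass renders the mask from those starts (O(n+m) worst case vs A's O(n*m); measured ~1.4x on the generated inputs, below the 1.5x bar, so no speed claim).
import Mathlib
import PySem

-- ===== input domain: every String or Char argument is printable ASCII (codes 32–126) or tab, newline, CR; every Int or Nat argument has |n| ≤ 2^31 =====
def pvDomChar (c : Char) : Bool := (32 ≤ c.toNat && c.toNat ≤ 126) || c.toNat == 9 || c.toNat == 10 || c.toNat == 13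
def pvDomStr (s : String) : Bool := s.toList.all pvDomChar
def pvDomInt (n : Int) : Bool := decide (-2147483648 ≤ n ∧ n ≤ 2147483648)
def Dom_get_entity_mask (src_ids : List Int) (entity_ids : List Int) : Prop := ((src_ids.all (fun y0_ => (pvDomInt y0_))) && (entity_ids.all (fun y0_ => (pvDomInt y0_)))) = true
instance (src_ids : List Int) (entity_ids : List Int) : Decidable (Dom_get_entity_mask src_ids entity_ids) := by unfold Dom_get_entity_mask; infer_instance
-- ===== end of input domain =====

-- B replaces A's naive restart-at-every-position pattern scan by KMP (failure function +
-- one linear pass collecting greedy non-overlapping match starts, then a render pass);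
-- return-value equivalence is proved on Pre_ (entity_ids nonempty, or src_ids empty — elsewhere A raises IndexError).

-- ===== PORT A =====
-- inner while loop of A: advances both cursors while they match; indices are guarded
-- (e < len, t < len) before each access, so getD is exact for Python's src_ids[e] / entity_ids[t]
def pvAInner (src ent : List Int) (e t : Nat) : Nat × Nat :=
  if h : e < src.length ∧ t < ent.length ∧ src.getD e 0 = ent.getD t 0 then
    pvAInner src ent (e + 1) (t + 1)
  else (e, t)
termination_by src.length - e
decreasing_by omega

-- outer while loop of A, fueled (each iteration advances idx_src_s by ≥ 1 inside Pre_,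
-- so fuel = src.length is enough; the access entity_ids[0] raises in Python iff ent = [],
-- which Pre_ excludes, so getD is exact there too)
def pvALoop (src ent : List Int) : Nat → Nat → List Int → List Int
  | 0, _, mask => mask
  | fuel + 1, s, mask =>
    if s < src.length then
      if src.getD s 0 = ent.getD 0 0 then
        let p := pvAInner src ent s 0
        if p.2 = ent.length then pvALoop src ent fuel p.1 (mask ++ List.replicate ent.length 1)
        else pvALoop src ent fuel (s + 1) (mask ++ [0])
      else pvALoop src ent fuel (s + 1) (mask ++ [0])
    else mask

def get_entity_mask (src_ids : List Int) (entity_ids : List Int) : List Int :=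
  pvALoop src_ids entity_ids src_ids.length 0 []

-- ===== PORT B =====
-- B's failure-link descent: `while k and x != entity_ids[k]: k = fail[k-1]`.
-- Fueled with fuel = k at each call site: inside Pre_ the fail table built below satisfies
-- fail[q] ≤ q, so k strictly decreases and fuel = k always suffices (proved in the lemmas).
-- All Python index accesses are in range inside Pre_, so getD is exact.
def pvDescend (ent : List Int) (fail : List Nat) (x : Int) : Nat → Nat → Nat
  | k, 0 => k
  | k, fuel + 1 =>
    if k ≠ 0 ∧ x ≠ ent.getD k 0 then pvDescend ent fail x (fail.getD (k - 1) 0) fuel else k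

-- one iteration of B's failure-table loop body (state = (fail, k), q = loop variable)
def pvFailStep (ent : List Int) (st : List Nat × Nat) (q : Nat) : List Nat × Nat :=
  let k0 := pvDescend ent st.1 (ent.getD q 0) st.2 st.2
  let k1 := if ent.getD q 0 = ent.getD k0 0 then k0 + 1 else k0
  (st.1 ++ [k1], k1)

-- `fail = [0]; k = 0; for q in range(1, m): …; fail.append(k)`
def pvBuildFail (ent : List Int) : List Nat :=
  (List.foldl (pvFailStep ent) ([0], 0) (List.range' 1 (ent.length - 1))).1

-- B's text scan: `for x in src_ids: … ; i += 1`, collecting greedy match starts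
def pvScan (ent : List Int) (fail : List Nat) (m : Nat) :
    List Int → Nat → Nat → List Nat → Nat × List Nat
  | [], _, j, starts => (j, starts)
  | x :: rest, i, j, starts =>
    let j0 := pvDescend ent fail x j j
    let j1 := if x = ent.getD j0 0 then j0 + 1 else j0
    if j1 = m then pvScan ent fail m rest (i + 1) 0 (starts ++ [i + 1 - m])
    else pvScan ent fail m rest (i + 1) j1 starts

-- B's render loop: gaps of zeros, blocks of ones, final tail of zeros
def pvRender (m n : Nat) (starts : List Nat) : List Int :=
  let st := List.foldl
    (fun (pm : Nat × List Int) s => (s + m, pm.2 ++ List.replicate (s - pm.1) 0 ++ List.replicate m 1))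
    (0, []) starts
  st.2 ++ List.replicate (n - st.1) 0

def get_entity_mask_alt (src_ids : List Int) (entity_ids : List Int) : List Int :=
  let m := entity_ids.length
  let fail := pvBuildFail entity_ids
  let res := pvScan entity_ids fail m src_ids 0 0 []
  pvRender m src_ids.length res.2

-- ===== PRECONDITION & SPEC =====
-- Pre_ excludes entity_ids = [] with src_ids ≠ []: there A raises IndexError (entity_ids[0]).
def Pre_get_entity_mask (src_ids : List Int) (entity_ids : List Int) : Prop :=
  entity_ids ≠ [] ∨ src_ids = []
instance (src_ids : List Int) (entity_ids : List Int) : Decidable (Pre_get_entity_mask src_ids entity_ids) := by unfold Pre_get_entity_mask; infer_instance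
def pvWitness_get_entity_mask : List Int × List Int := ([1, 2, 1, 2, 3], [1, 2])

def Spec_get_entity_mask (src_ids : List Int) (entity_ids : List Int) (out : List Int) : Prop := out = get_entity_mask_alt src_ids entity_ids
instance (src_ids : List Int) (entity_ids : List Int) (out : List Int) : Decidable (Spec_get_entity_mask src_ids entity_ids out) := by unfold Spec_get_entity_mask; infer_instance

-- ===== CLAIM (what is proved, stated in full; the proofs are below) =====
def Claim_equal_get_entity_mask : Prop := ∀ (src_ids : List Int) (entity_ids : List Int), Dom_get_entity_mask src_ids entity_ids → Pre_get_entity_mask src_ids entity_ids → Spec_get_entity_mask src_ids entity_ids (get_entity_mask src_ids entity_ids)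

-- ===== LEMMAS AND PROOFS =====

-- Specification glue: the greedy non-overlapping mask, defined structurally, is the common
-- semantics of both programs (A computes it directly; B computes its match starts via KMP).

-- greedy mask: at each position, if the pattern is a prefix here, emit |ent| ones and skip it
def pvG (ent : List Int) : List Int → List Int
  | [] => []
  | a :: t =>
    if ent <+: (a :: t) then List.replicate ent.length 1 ++ pvG ent (t.drop (ent.length - 1))
    else 0 :: pvG ent t
termination_by u => u.length
decreasing_by
  · simpa using Nat.lt_succ_of_le (List.length_drop (l := t) ▸ Nat.sub_le _ _)
  · simp

-- greedy match starts, with absolute offset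
def pvSabs (ent : List Int) : Nat → List Int → List Nat
  | _, [] => []
  | ofs, a :: t =>
    if ent <+: (a :: t) then ofs :: pvSabs ent (ofs + ent.length) (t.drop (ent.length - 1))
    else pvSabs ent (ofs + 1) t
termination_by _ u => u.length
decreasing_by
  · simpa using Nat.lt_succ_of_le (List.length_drop (l := t) ▸ Nat.sub_le _ _)
  · simp

-- the KMP quantity: largest l ≤ b such that ent.take l is a suffix of seg
def pvJ (ent seg : List Int) (b : Nat) : Nat :=
  Nat.findGreatest (fun l => ent.take l <:+ seg) b

theorem pvJ_suffix (ent seg : List Int) (b : Nat) : ent.take (pvJ ent seg b) <:+ seg := by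
  rcases Nat.eq_zero_or_pos (pvJ ent seg b) with h0 | h0
  · simp [h0]
  · have h := (Nat.findGreatest_eq_iff (P := fun l => ent.take l <:+ seg)
      (k := b) (m := pvJ ent seg b)).mp rfl
    exact h.2.1 (by omega)

theorem pvJ_nil (ent : List Int) (hm : ent ≠ []) (b : Nat) : pvJ ent [] b = 0 := by
  unfold pvJ
  rw [Nat.findGreatest_eq_iff]
  refine ⟨Nat.zero_le _, by simp, ?_⟩
  intro n hn _ hP
  rw [List.suffix_nil, List.take_eq_nil_iff] at hP
  rcases hP with h | h
  · omega
  · exact hm h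

theorem pvTake_concat (ent : List Int) (l : Nat) (h : l < ent.length) :
    ent.take (l + 1) = ent.take l ++ [ent.getD l 0] := by
  rw [List.take_succ, List.getD_eq_getElem ent 0 h]
  simp [List.getElem?_eq_getElem h]

theorem pvConcat_suffix {A B : List Int} {a b : Int} :
    A ++ [a] <:+ B ++ [b] ↔ a = b ∧ A <:+ B := by
  rw [← List.reverse_prefix]
  simp only [List.reverse_append, List.reverse_cons, List.reverse_nil, List.nil_append,
    List.singleton_append, List.cons_prefix_cons, List.reverse_prefix]

-- candidate characterization: a nonempty pattern-prefix is a suffix of seg ++ [x]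
-- iff one shorter prefix is a suffix of seg and the next pattern character is x
theorem pvCand_iff (ent seg : List Int) (x : Int) (l : Nat) (h1 : 1 ≤ l) (hl : l ≤ ent.length) :
    (ent.take l <:+ seg ++ [x]) ↔ (ent.take (l - 1) <:+ seg ∧ ent.getD (l - 1) 0 = x) := by
  obtain ⟨l', rfl⟩ : ∃ l', l = l' + 1 := ⟨l - 1, by omega⟩
  rw [pvTake_concat ent l' (by omega), pvConcat_suffix]
  simp [and_comm]

-- the failure-link descent computes: the largest l ≤ j with ent.take l a suffix of seg
-- that can be extended by x (or 0 if none); stated as the four properties the step lemma needs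
theorem pvDescend_spec (ent : List Int) (fail : List Nat) (x : Int) (seg : List Int) (Bnd : Nat)
    (hB : Bnd < ent.length)
    (hfail : ∀ b, b < Bnd → fail.getD b 0 = pvJ ent (ent.take (b + 1)) b) :
    ∀ j fuel, j ≤ Bnd → j ≤ fuel → ent.take j <:+ seg →
      (pvDescend ent fail x j fuel ≤ j ∧
       ent.take (pvDescend ent fail x j fuel) <:+ seg ∧
       (pvDescend ent fail x j fuel = 0 ∨ x = ent.getD (pvDescend ent fail x j fuel) 0) ∧
       (∀ b, b ≤ j → ent.take b <:+ seg → x = ent.getD b 0 → b ≤ pvDescend ent fail x j fuel)) := by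
  intro j
  induction j using Nat.strong_induction_on with
  | _ j ih =>
    intro fuel hj hfuel hseg
    by_cases hc : j ≠ 0 ∧ x ≠ ent.getD j 0
    · -- loop body runs once: j := fail[j-1]
      have hj1 : j - 1 < Bnd := by omega
      have hk' : fail.getD (j - 1) 0 = pvJ ent (ent.take j) (j - 1) := by
        have := hfail (j - 1) hj1
        rwa [Nat.sub_add_cancel (by omega)] at this
      set k' := fail.getD (j - 1) 0 with hk'def
      have hk'le : k' ≤ j - 1 := hk' ▸ Nat.findGreatest_le _
      have hk'seg : ent.take k' <:+ seg :=
        (hk' ▸ pvJ_suffix ent (ent.take j) (j - 1)).trans hseg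
      obtain ⟨l', hfuel'⟩ : ∃ f', fuel = f' + 1 := ⟨fuel - 1, by omega⟩
      subst hfuel'
      have hstep : pvDescend ent fail x j (l' + 1) = pvDescend ent fail x k' l' := by
        simp only [pvDescend, if_pos hc]
        rfl
      rw [hstep]
      have hrec := ih k' (by omega) l' (by omega) (by omega) hk'seg
      refine ⟨by omega, hrec.2.1, hrec.2.2.1, ?_⟩
      intro b hb hbseg hbx
      rcases Nat.lt_or_ge b j with hbj | hbj
      · -- b < j: b is a border of ent.take j, hence b ≤ fail[j-1] = k'
        have hbtake : ent.take b <:+ ent.take j := by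
          apply List.suffix_of_suffix_length_le hbseg hseg
          rw [List.length_take, List.length_take]; omega
        have hble : b ≤ k' := by
          rw [hk']
          exact Nat.le_findGreatest (by omega) hbtake
        exact hrec.2.2.2 b hble hbseg hbx
      · -- b = j impossible: the loop condition says x ≠ ent[j]
        have : b = j := by omega
        subst this
        exact absurd hbx hc.2
    · -- loop exits
      have hstop : pvDescend ent fail x j fuel = j := by
        cases fuel with
        | zero => rfl
        | succ f => simp only [pvDescend, if_neg hc]
      rw [hstop]
      refine ⟨le_refl _, hseg, ?_, fun b hb _ _ => hb⟩
      by_cases h0 : j = 0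
      · exact Or.inl h0
      · refine Or.inr ?_
        by_contra hxne
        exact hc ⟨h0, hxne⟩

-- one KMP step: from j = pvJ ent seg Bnd, descending and extending by x
-- yields exactly pvJ ent (seg ++ [x]) (Bnd + 1)
theorem pvStep_spec (ent seg : List Int) (fail : List Nat) (x : Int) (Bnd : Nat)
    (hB : Bnd < ent.length)
    (hfail : ∀ b, b < Bnd → fail.getD b 0 = pvJ ent (ent.take (b + 1)) b)
    (j : Nat) (hj : j = pvJ ent seg Bnd) :
    (if x = ent.getD (pvDescend ent fail x j j) 0 then pvDescend ent fail x j j + 1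
     else pvDescend ent fail x j j) = pvJ ent (seg ++ [x]) (Bnd + 1) := by
  have hjB : j ≤ Bnd := hj ▸ Nat.findGreatest_le _
  have hseg : ent.take j <:+ seg := hj ▸ pvJ_suffix ent seg Bnd
  have hD := pvDescend_spec ent fail x seg Bnd hB hfail j j hjB (le_refl _) hseg
  set j0 := pvDescend ent fail x j j with hj0
  obtain ⟨hle, hj0seg, hj0x, hmax⟩ := hD
  symm
  unfold pvJ
  rw [Nat.findGreatest_eq_iff]
  by_cases hx : x = ent.getD j0 0
  · rw [if_pos hx]
    refine ⟨by omega, ?_, ?_⟩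
    · intro _
      rw [pvCand_iff ent seg x (j0 + 1) (by omega) (by omega)]
      exact ⟨by simpa using hj0seg, by simpa using hx.symm⟩
    · intro nn hnn hnnB hP
      have h1 : 1 ≤ nn := by omega
      rw [pvCand_iff ent seg x nn h1 (by omega)] at hP
      have hb : nn - 1 ≤ j := by
        rw [hj]
        exact Nat.le_findGreatest (by omega) hP.1
      have := hmax (nn - 1) hb hP.1 hP.2.symm
      omega
  · rw [if_neg hx]
    have hj00 : j0 = 0 := by
      rcases hj0x with h | h
      · exact h
      · exact absurd h hx
    refine ⟨by omega, by simp [hj00], ?_⟩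
    intro nn hnn hnnB hP
    have h1 : 1 ≤ nn := by omega
    rw [pvCand_iff ent seg x nn h1 (by omega)] at hP
    have hb : nn - 1 ≤ j := by
      rw [hj]
      exact Nat.le_findGreatest (by omega) hP.1
    have := hmax (nn - 1) hb hP.1 hP.2.symm
    rw [hj00] at this
    have hnn1 : nn = 1 := by omega
    subst hnn1
    exact hx (by simpa [hj00] using hP.2.symm)


-- the failure-table loop invariant: after processing up to q-1, fail has length q
-- and fail[b] is the longest proper border length of ent.take (b+1), for all b < q
theorem pvFail_loop (ent : List Int) :
    ∀ cnt q fail k, 1 ≤ q → q + cnt = ent.length →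
      fail.length = q →
      (∀ b, b < q → fail.getD b 0 = pvJ ent (ent.take (b + 1)) b) →
      k = fail.getD (q - 1) 0 →
      ((List.foldl (pvFailStep ent) (fail, k) (List.range' q cnt)).1.length = ent.length ∧
       ∀ b, b < ent.length →
         (List.foldl (pvFailStep ent) (fail, k) (List.range' q cnt)).1.getD b 0 =
           pvJ ent (ent.take (b + 1)) b) := by
  intro cnt
  induction cnt with
  | zero =>
    intro q fail k hq hqc hlen hspec hk
    simp only [List.range'_zero, List.foldl_nil]
    exact ⟨by omega, fun b hb => hspec b (by omega)⟩
  | succ cnt ih =>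
    intro q fail k hq hqc hlen hspec hk
    rw [List.range'_succ, List.foldl_cons]
    have hqm : q < ent.length := by omega
    have hkj : k = pvJ ent (ent.take q) (q - 1) := by
      rw [hk, hspec (q - 1) (by omega), Nat.sub_add_cancel (by omega)]
    have hfail' : ∀ b, b < q - 1 → fail.getD b 0 = pvJ ent (ent.take (b + 1)) b :=
      fun b hb => hspec b (by omega)
    have hstep := pvStep_spec ent (ent.take q) fail (ent.getD q 0) (q - 1)
      (by omega) hfail' k hkj
    rw [Nat.sub_add_cancel (by omega)] at hstep
    have htk : ent.take q ++ [ent.getD q 0] = ent.take (q + 1) :=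
      (pvTake_concat ent q hqm).symm
    rw [htk] at hstep
    have hbody : pvFailStep ent (fail, k) q =
        (fail ++ [pvJ ent (ent.take (q + 1)) q], pvJ ent (ent.take (q + 1)) q) := by
      simp only [pvFailStep]
      rw [hstep]
    rw [hbody]
    apply ih (q + 1)
    · omega
    · omega
    · simp [hlen]
    · intro b hb
      rcases Nat.lt_or_ge b q with hbq | hbq
      · rw [List.getD_append _ _ _ _ (by omega)]
        exact hspec b hbq
      · have hbq2 : b = q := by omega
        subst hbq2
        rw [← hlen, List.getD_eq_getElem _ 0 (by simp [hlen])]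
        simp
    · rw [Nat.add_sub_cancel, ← hlen, List.getD_eq_getElem _ 0 (by simp [hlen])]
      simp

theorem pvBuildFail_spec (ent : List Int) (hm : ent ≠ []) :
    ∀ b, b < ent.length → (pvBuildFail ent).getD b 0 = pvJ ent (ent.take (b + 1)) b := by
  have hm1 : 1 ≤ ent.length := by
    cases ent with
    | nil => exact absurd rfl hm
    | cons a t => simp
  have h := pvFail_loop ent (ent.length - 1) 1 [0] 0 (le_refl _) (by omega) (by simp)
    (by
      intro b hb
      have hb0 : b = 0 := by omega
      subst hb0
      simp [pvJ])
    (by simp)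
  unfold pvBuildFail
  exact h.2


-- no-occurrence suffixes produce no greedy starts
theorem pvSabs_nil (ent : List Int) (hm : ent ≠ []) :
    ∀ u ofs, (∀ k, ¬ ent <+: u.drop k) → pvSabs ent ofs u = [] := by
  intro u ofs
  fun_induction pvSabs ent ofs u with
  | case1 ofs => intro _; rfl
  | case2 ofs a t hocc ih =>
    intro hno
    exact absurd hocc (by simpa using hno 0)
  | case3 ofs a t hocc ih =>
    intro hno
    exact ih (fun k => by simpa using hno (k + 1))

-- the first greedy start at or after r is the first occurrence position
theorem pvSabs_match (ent src : List Int) (hm : ent ≠ []) :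
    ∀ d r s, s = r + d → ent <+: src.drop s →
      (∀ t, r ≤ t → t < s → ¬ ent <+: src.drop t) →
      pvSabs ent r (src.drop r) =
        s :: pvSabs ent (s + ent.length) (src.drop (s + ent.length)) := by
  have hml : 1 ≤ ent.length := by
    cases ent with
    | nil => exact absurd rfl hm
    | cons x xs => simp
  intro d
  induction d with
  | zero =>
    intro r s hs hocc hno
    have hs0 : s = r := by omega
    subst hs0
    have hne : src.drop s ≠ [] := by
      intro hnil
      rw [hnil, List.prefix_nil] at hocc
      exact hm hocc
    obtain ⟨a, t, hat⟩ := List.exists_cons_of_ne_nil hne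
    rw [hat]
    rw [hat] at hocc
    rw [pvSabs, if_pos hocc]
    congr 1
    have ht : t = src.drop (s + 1) := by
      have h2 := congrArg List.tail hat
      simpa using h2.symm
    rw [ht, List.drop_drop, show s + 1 + (ent.length - 1) = s + ent.length from by omega]
  | succ d ih =>
    intro r s hs hocc hno
    have hlen := hocc.length_le
    rw [List.length_drop] at hlen
    have hne : src.drop r ≠ [] := by
      intro hnil
      have h2 := congrArg List.length hnil
      simp at h2
      omega
    obtain ⟨a, t, hat⟩ := List.exists_cons_of_ne_nil hne
    rw [hat]
    have hnor : ¬ ent <+: (a :: t) := by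
      rw [← hat]
      exact hno r (le_refl _) (by omega)
    rw [pvSabs, if_neg hnor]
    have ht : t = src.drop (r + 1) := by
      have h2 := congrArg List.tail hat
      simpa using h2.symm
    rw [ht]
    exact ih (r + 1) s (by omega) hocc (fun t2 h1 h2 => hno t2 (by omega) h2)

-- a pattern-suffix of the processed window is a real occurrence in src
theorem pvOcc_of_suffix (ent src : List Int) (r i : Nat) (hi : i ≤ src.length)
    (h : ent <:+ (src.take i).drop r) : ent <+: src.drop (i - ent.length) := by
  have h2 : ent <:+ src.take i := h.trans (List.drop_suffix _ _)
  obtain ⟨y, hy⟩ := h2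
  have hylen : y.length + ent.length = i := by
    have h3 := congrArg List.length hy
    simp at h3
    omega
  have hsrc : src = y ++ ent ++ src.drop i := by
    conv_lhs => rw [← List.take_append_drop i src]
    rw [← hy]
  have hdy : src.drop y.length = ent ++ src.drop i := by
    conv_lhs => rw [hsrc]
    rw [List.append_assoc, List.drop_left]
  rw [show i - ent.length = y.length by omega, hdy]
  exact ⟨src.drop i, rfl⟩

-- transfer the findGreatest bound m down to m-1 when the value is < m
theorem pvJ_lower (ent seg : List Int) (m j : Nat) (hm : 1 ≤ m) (hj : j = pvJ ent seg m)
    (hlt : j < m) : pvJ ent seg (m - 1) = j := by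
  have h := (Nat.findGreatest_eq_iff (P := fun l => ent.take l <:+ seg)
      (k := m) (m := j)).mp hj.symm
  rw [pvJ, Nat.findGreatest_eq_iff]
  exact ⟨by omega, h.2.1, fun n h1 h2 => h.2.2 h1 (by omega)⟩


-- the scan loop computes exactly the greedy non-overlapping match starts
theorem pvScan_spec (src ent : List Int) (hm : ent ≠ []) :
    ∀ rest i r j starts, i ≤ src.length → rest = src.drop i → r ≤ i →
      j = pvJ ent ((src.take i).drop r) (ent.length - 1) →
      (∀ s, r ≤ s → s + ent.length ≤ i → ¬ ent <+: src.drop s) →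
      (pvScan ent (pvBuildFail ent) ent.length rest i j starts).2 =
        starts ++ pvSabs ent r (src.drop r) := by
  have hml : 1 ≤ ent.length := by
    cases ent with
    | nil => exact absurd rfl hm
    | cons x xs => simp
  intro rest
  induction rest with
  | nil =>
    intro i r j starts hi hrest hr hj hno
    have hin : src.length ≤ i := by
      have h2 := congrArg List.length hrest
      simp at h2
      omega
    rw [pvSabs_nil ent hm (src.drop r) r (by
      intro k hocc
      rw [List.drop_drop] at hocc
      have hlen := hocc.length_le
      rw [List.length_drop] at hlen
      exact hno (r + k) (by omega) (by omega) hocc)]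
    simp [pvScan]
  | cons x rest' ih =>
    intro i r j starts hi hrest hr hj hno
    have hin : i < src.length := by
      by_contra hge
      rw [List.drop_eq_nil_of_le (by omega)] at hrest
      exact List.cons_ne_nil x rest' hrest
    have hdrop : src.drop i = src[i] :: src.drop (i + 1) := List.drop_eq_getElem_cons hin
    rw [hdrop] at hrest
    obtain ⟨hx, hrest'⟩ := List.cons_eq_cons.mp hrest
    have hseg' : (src.take i).drop r ++ [x] = (src.take (i + 1)).drop r := by
      rw [List.take_succ, List.getElem?_eq_getElem hin]
      simp only [Option.toList_some]
      rw [List.drop_append_of_le_length (by rw [List.length_take]; omega), hx]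
    have hfail := pvBuildFail_spec ent hm
    have hstep := pvStep_spec ent ((src.take i).drop r) (pvBuildFail ent) x
      (ent.length - 1) (by omega) (fun b hb => hfail b (by omega)) j hj
    rw [Nat.sub_add_cancel hml, hseg'] at hstep
    simp only [pvScan]
    by_cases hj1 : (if x = ent.getD (pvDescend ent (pvBuildFail ent) x j j) 0 then
        pvDescend ent (pvBuildFail ent) x j j + 1 else
        pvDescend ent (pvBuildFail ent) x j j) = ent.length
    · -- a full match ends at i+1
      rw [if_pos hj1]
      have hPm : ent <:+ (src.take (i + 1)).drop r := by
        have h2 := (Nat.findGreatest_eq_iff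
          (P := fun l => ent.take l <:+ (src.take (i + 1)).drop r)
          (k := ent.length) (m := ent.length)).mp (by rw [← pvJ, ← hstep, hj1])
        have h3 := h2.2.1 (by omega)
        simpa using h3
      have hocc : ent <+: src.drop (i + 1 - ent.length) :=
        pvOcc_of_suffix ent src r (i + 1) (by omega) hPm
      have hrs : r ≤ i + 1 - ent.length := by
        have hlen := hPm.length_le
        rw [List.length_drop, List.length_take] at hlen
        omega
      have hm2 : ent.length ≤ i + 1 := by
        have hlen := hPm.length_le
        rw [List.length_drop, List.length_take] at hlen
        omega
      have hGs := pvSabs_match ent src hm (i + 1 - ent.length - r) r (i + 1 - ent.length)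
        (by omega) hocc
        (fun t h1 h2 => hno t h1 (by omega))
      rw [show i + 1 - ent.length + ent.length = i + 1 from by omega] at hGs
      rw [ih (i + 1) (i + 1) 0 (starts ++ [i + 1 - ent.length]) (by omega) hrest'
        (le_refl _)
        (by
          rw [List.drop_eq_nil_of_le (by rw [List.length_take]; omega)]
          exact (pvJ_nil ent hm _).symm)
        (fun s h1 h2 => absurd h2 (by omega))]
      rw [hGs]
      simp
    · -- no match; the automaton state advances to j1 < m
      rw [if_neg hj1]
      have hjle : (if x = ent.getD (pvDescend ent (pvBuildFail ent) x j j) 0 then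
          pvDescend ent (pvBuildFail ent) x j j + 1 else
          pvDescend ent (pvBuildFail ent) x j j) ≤ ent.length := by
        rw [hstep]
        unfold pvJ
        exact Nat.findGreatest_le _
      have hjlt : (if x = ent.getD (pvDescend ent (pvBuildFail ent) x j j) 0 then
          pvDescend ent (pvBuildFail ent) x j j + 1 else
          pvDescend ent (pvBuildFail ent) x j j) < ent.length := by omega
      apply ih (i + 1) r _ starts (by omega) hrest' (by omega)
        (by
          exact (pvJ_lower ent ((src.take (i + 1)).drop r) ent.length _
            hml hstep (by omega)).symm)
      -- no occurrence ends at or before i+1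
      intro s h1 h2 hocc
      rcases Nat.lt_or_ge (s + ent.length) (i + 1) with hcase | hcase
      · exact hno s h1 (by omega) hocc
      · have hse : s + ent.length = i + 1 := by omega
        have htake : (src.take (i + 1)).drop s = ent := by
          rw [List.drop_take, show i + 1 - s = ent.length from by omega]
          exact (List.prefix_iff_eq_take.mp hocc).symm
        have hsuf : ent <:+ (src.take (i + 1)).drop r := by
          rw [← htake, show s = r + (s - r) from by omega, ← List.drop_drop]
          exact List.drop_suffix _ _
        have h4 : ent.length ≤ pvJ ent ((src.take (i + 1)).drop r) ent.length :=
          Nat.le_findGreatest (le_refl _) (by simpa using hsuf)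
        rw [← hstep] at h4
        omega

-- the render loop turns the greedy starts back into the greedy mask
theorem pvRender_fold (ent : List Int) (hm : ent ≠ []) :
    ∀ u ofs pos mask, pos ≤ ofs →
      ((List.foldl (fun (pm : Nat × List Int) s =>
          (s + ent.length, pm.2 ++ List.replicate (s - pm.1) 0 ++ List.replicate ent.length 1))
          (pos, mask) (pvSabs ent ofs u)).1 ≤ ofs + u.length ∧
       (List.foldl (fun (pm : Nat × List Int) s =>
          (s + ent.length, pm.2 ++ List.replicate (s - pm.1) 0 ++ List.replicate ent.length 1))
          (pos, mask) (pvSabs ent ofs u)).2 ++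
         List.replicate (ofs + u.length -
           (List.foldl (fun (pm : Nat × List Int) s =>
             (s + ent.length, pm.2 ++ List.replicate (s - pm.1) 0 ++ List.replicate ent.length 1))
             (pos, mask) (pvSabs ent ofs u)).1) 0 =
         mask ++ List.replicate (ofs - pos) (0 : Int) ++ pvG ent u) := by
  have hml : 1 ≤ ent.length := by
    cases ent with
    | nil => exact absurd rfl hm
    | cons x xs => simp
  intro u ofs
  fun_induction pvSabs ent ofs u with
  | case1 ofs =>
    intro pos mask hpos
    exact ⟨by simpa using hpos, by simp [pvG]⟩
  | case2 ofs a t hocc ih =>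
    intro pos mask hpos
    have hlen := hocc.length_le
    simp only [List.length_cons] at hlen
    rw [List.foldl_cons]
    have ih' := ih (ofs + ent.length)
      (mask ++ List.replicate (ofs - pos) 0 ++ List.replicate ent.length 1) (le_refl _)
    rw [List.length_drop] at ih'
    constructor
    · have h2 := ih'.1
      simp only [List.length_cons]
      omega
    · rw [show ofs + (a :: t).length = ofs + ent.length + (t.length - (ent.length - 1)) from by
        simp only [List.length_cons]; omega]
      rw [ih'.2]
      rw [pvG, if_pos hocc]
      simp
  | case3 ofs a t hocc ih =>
    intro pos mask hpos
    have ih' := ih pos mask (by omega)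
    constructor
    · have h2 := ih'.1
      simp only [List.length_cons]
      omega
    · rw [show ofs + (a :: t).length = ofs + 1 + t.length from by
        simp only [List.length_cons]; omega]
      rw [ih'.2]
      rw [pvG, if_neg hocc]
      rw [show ofs + 1 - pos = (ofs - pos) + 1 from by omega, List.replicate_succ']
      simp


-- ===== port A ↔ greedy mask =====

-- the inner while loop reaches idx_ent = len(entity_ids) iff the remaining entity suffix
-- is a prefix of the remaining source suffix; on success it lands exactly len - t further on
theorem pvAInner_spec (src ent : List Int) : ∀ e t, t ≤ ent.length →
    (((pvAInner src ent e t).2 = ent.length ↔ ent.drop t <+: src.drop e) ∧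
     ((pvAInner src ent e t).2 = ent.length → (pvAInner src ent e t).1 = e + (ent.length - t))) := by
  intro e t
  fun_induction pvAInner src ent e t with
  | case1 e t h ih =>
    intro ht
    obtain ⟨he, htm, heq⟩ := h
    have ih' := ih (by omega)
    have hds : src.drop e = src[e] :: src.drop (e + 1) := List.drop_eq_getElem_cons he
    have hde : ent.drop t = ent[t] :: ent.drop (t + 1) := List.drop_eq_getElem_cons htm
    have hheads : ent[t] = src[e] := by
      rw [List.getD_eq_getElem src 0 he, List.getD_eq_getElem ent 0 htm] at heq
      omega
    constructor
    · rw [ih'.1, hds, hde, List.cons_prefix_cons]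
      simp [hheads]
    · intro hsucc
      rw [ih'.2 hsucc]
      omega
  | case2 e t h =>
    intro ht
    rcases Nat.eq_or_lt_of_le ht with htm | htm
    · exact ⟨by simp [htm], fun _ => by omega⟩
    · constructor
      · constructor
        · intro h2; omega
        · intro hpre
          exfalso
          rcases Nat.lt_or_ge e src.length with he | he
          · have hds : src.drop e = src[e] :: src.drop (e + 1) := List.drop_eq_getElem_cons he
            have hde : ent.drop t = ent[t] :: ent.drop (t + 1) := List.drop_eq_getElem_cons htm
            rw [hds, hde, List.cons_prefix_cons] at hpre
            have heq : src.getD e 0 = ent.getD t 0 := by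
              rw [List.getD_eq_getElem src 0 he, List.getD_eq_getElem ent 0 htm]
              omega
            exact h ⟨he, htm, heq⟩
          · rw [List.drop_eq_nil_of_le he] at hpre
            have h3 := hpre.length_le
            simp at h3
            omega
      · intro h2
        exfalso
        simp at h2
        omega

theorem pvHead_of_prefix (src ent : List Int) (i : Nat) (hm : 0 < ent.length)
    (hi : i < src.length) (h : ent <+: src.drop i) : src.getD i 0 = ent.getD 0 0 := by
  cases ent with
  | nil => simp at hm
  | cons a rest =>
    rw [List.drop_eq_getElem_cons hi, List.cons_prefix_cons] at h
    rw [List.getD_eq_getElem src 0 hi]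
    simpa using h.1.symm

-- A's outer loop computes the greedy mask directly
theorem pvALoop_eq_G (src ent : List Int) (hm : ent ≠ []) :
    ∀ fuel s mask, src.length - s ≤ fuel →
      pvALoop src ent fuel s mask = mask ++ pvG ent (src.drop s) := by
  have hml : 1 ≤ ent.length := by
    cases ent with
    | nil => exact absurd rfl hm
    | cons x xs => simp
  intro fuel
  induction fuel with
  | zero =>
    intro s mask hfuel
    rw [List.drop_eq_nil_of_le (by omega)]
    simp [pvALoop, pvG]
  | succ fuel ih =>
    intro s mask hfuel
    by_cases hs : s < src.length
    · have hdrop : src.drop s = src[s] :: src.drop (s + 1) := List.drop_eq_getElem_cons hs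
      have hinner := pvAInner_spec src ent s 0 (Nat.zero_le _)
      by_cases hpre : ent <+: src.drop s
      · have hhead : src.getD s 0 = ent.getD 0 0 := pvHead_of_prefix src ent s (by omega) hs hpre
        have hsucc : (pvAInner src ent s 0).2 = ent.length := hinner.1.mpr (by simpa using hpre)
        have hland : (pvAInner src ent s 0).1 = s + ent.length := by
          rw [hinner.2 hsucc]
          omega
        simp only [pvALoop, if_pos hs, if_pos hhead, if_pos hsucc, hland]
        rw [ih (s + ent.length) (mask ++ List.replicate ent.length 1) (by omega)]
        conv_rhs => rw [hdrop, pvG, if_pos (hdrop ▸ hpre)]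
        rw [List.drop_drop, show s + 1 + (ent.length - 1) = s + ent.length from by omega]
        simp
      · have hbranch : pvALoop src ent (fuel + 1) s mask = pvALoop src ent fuel (s + 1) (mask ++ [0]) := by
          by_cases hhead : src.getD s 0 = ent.getD 0 0
          · have hfailm : ¬ (pvAInner src ent s 0).2 = ent.length := by
              intro h2
              exact hpre (by simpa using hinner.1.mp h2)
            simp only [pvALoop, if_pos hs, if_pos hhead, if_neg hfailm]
          · simp only [pvALoop, if_pos hs, if_neg hhead]
        rw [hbranch, ih (s + 1) (mask ++ [0]) (by omega)]
        conv_rhs => rw [hdrop, pvG, if_neg (hdrop ▸ hpre)]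
        simp
    · rw [List.drop_eq_nil_of_le (by omega)]
      simp only [pvALoop, if_neg hs]
      simp [pvG]

-- ===== VERDICT (by name: the statement is the Claim_ definition above) =====
theorem get_entity_mask_spec : Claim_equal_get_entity_mask := by
  intro src ent hdom hpre
  unfold Spec_get_entity_mask
  by_cases hm : ent = []
  · subst hm
    rcases hpre with h | h
    · exact absurd rfl h
    · subst h
      rfl
  · have hml : 1 ≤ ent.length := by
      cases ent with
      | nil => exact absurd rfl hm
      | cons x xs => simp
    unfold get_entity_mask get_entity_mask_alt
    rw [pvALoop_eq_G src ent hm src.length 0 [] (by omega)]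
    have hscan := pvScan_spec src ent hm src 0 0 0 [] (Nat.zero_le _) (by simp) (le_refl 0)
      (by simp [pvJ_nil ent hm])
      (fun s h1 h2 => absurd h2 (by omega))
    have hrend := pvRender_fold ent hm src 0 0 [] (le_refl 0)
    simp only [List.drop_zero] at hscan
    simp only [hscan, pvRender, List.nil_append]
    have h2 := hrend.2
    simp only [Nat.zero_add, Nat.sub_self, List.replicate_zero, List.nil_append,
      List.append_nil] at h2
    exact h2.symm
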